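-- pv_equiv track=rewrite | github.com/vivitas/simba | simba/multi_poly.py | monom_multiply
-- ===== SOURCE A (Python) =====
-- import string
-- import copy
--
-- K_NAME_FOR_CONSTANT = " "
--
-- K_ZERO_MONOM = {}
--
-- VARIABLE_DOMAIN = string.ascii_letters
--
-- def constant(monom):
-- 	if monom == K_ZERO_MONOM:
-- 		return 0;
-- 	if K_NAME_FOR_CONSTANT in monom:
-- 		return monom[K_NAME_FOR_CONSTANT]
-- 	return 1
--
-- def order_of(monom, variable):
-- 	if variable not in monom:
-- 		return 0
-- 	return monom[variable]
--
-- def monom_multiply(monom_a, monom_b):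
-- 	result = copy.deepcopy(K_ZERO_MONOM)
-- 	for variable in VARIABLE_DOMAIN:
-- 		to_add = order_of(monom_a, variable) + order_of(monom_b, variable)
-- 		if to_add == 0:
-- 			continue
-- 		result[variable] = to_add;
-- 	result[K_NAME_FOR_CONSTANT] = constant(monom_a) * constant(monom_b)
-- 	return result
-- ===== SOURCE B (Python) =====
-- import string
--
-- def monom_multiply(monom_a, monom_b):
--     c = (monom_a.get(' ', 1) if monom_a else 0) * (monom_b.get(' ', 1) if monom_b else 0)
--     keys = set(monom_a) | set(monom_b)
--     letters = sorted(keys & set(string.ascii_letters), key=string.ascii_letters.index)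
--     result = {}
--     for k in letters:
--         s = monom_a.get(k, 0) + monom_b.get(k, 0)
--         if s != 0:
--             result[k] = s
--     result[' '] = c
--     return result
-- ===== Notes on version B (the rewrite author's own statement) =====
-- stated objective: simpler
-- what changed: B computes the constant product directly with dict.get and builds the variable slots by sorting the (key-union ∩ letters) of the two monoms instead of scanning all 52 alphabet letters with helper lookups.
import Mathlib
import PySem

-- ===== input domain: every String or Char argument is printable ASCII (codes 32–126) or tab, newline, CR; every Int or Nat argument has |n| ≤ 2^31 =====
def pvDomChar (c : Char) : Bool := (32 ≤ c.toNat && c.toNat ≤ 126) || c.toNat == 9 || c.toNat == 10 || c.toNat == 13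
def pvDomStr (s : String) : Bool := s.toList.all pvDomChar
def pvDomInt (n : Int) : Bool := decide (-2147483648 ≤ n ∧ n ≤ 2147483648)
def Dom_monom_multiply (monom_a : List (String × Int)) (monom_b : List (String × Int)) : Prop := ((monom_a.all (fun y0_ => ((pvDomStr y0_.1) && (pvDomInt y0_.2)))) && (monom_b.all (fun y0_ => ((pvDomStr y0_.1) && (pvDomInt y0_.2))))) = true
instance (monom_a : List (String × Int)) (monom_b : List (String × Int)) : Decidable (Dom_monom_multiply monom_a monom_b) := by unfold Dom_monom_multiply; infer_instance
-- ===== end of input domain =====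

-- B replaces A's scan of all 52 alphabet letters (with the order_of/constant helpers) by a direct
-- build from the monoms' own keys: sorted (key-union ∩ letters), then the constant slot via dict.get.
-- Equivalence of the RETURN value (dicts as insertion-ordered association lists).

-- ===== PORT A =====
-- VARIABLE_DOMAIN = string.ascii_letters, as the list of its 1-character strings (iterating a str yields 1-char strs)
def pvAlphabet : List String :=
  "abcdefghijklmnopqrstuvwxyzABCDEFGHIJKLMNOPQRSTUVWXYZ".toList.map (fun c => String.ofList [c])

-- constant(monom)
def pvConstant (m : List (String × Int)) : Int :=
  if m = [] then 0
  else if (PySem.Dict.mk m).contains " " then (PySem.Dict.mk m).getD " " 0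
  else 1

-- order_of(monom, variable)
def pvOrderOf (m : List (String × Int)) (v : String) : Int :=
  if (PySem.Dict.mk m).contains v then (PySem.Dict.mk m).getD v 0 else 0

def monom_multiply (monom_a : List (String × Int)) (monom_b : List (String × Int)) : List (String × Int) :=
  let result : PySem.Dict String Int :=
    pvAlphabet.foldl (fun r v =>
      let to_add := pvOrderOf monom_a v + pvOrderOf monom_b v
      if to_add = 0 then r else r.insert v to_add) (PySem.Dict.mk [])
  (result.insert " " (pvConstant monom_a * pvConstant monom_b)).items

-- ===== PORT B =====
def monom_multiply_alt (monom_a : List (String × Int)) (monom_b : List (String × Int)) : List (String × Int) :=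
  let c := (if monom_a = [] then 0 else (PySem.Dict.mk monom_a).getD " " 1)
         * (if monom_b = [] then 0 else (PySem.Dict.mk monom_b).getD " " 1)
  let keys := PySem.Set.union (PySem.Set.ofList (monom_a.map Prod.fst)) (PySem.Set.ofList (monom_b.map Prod.fst))
  -- key=string.ascii_letters.index : idxOf into pvAlphabet (every element of the set is present, so .index never raises)
  let letters := PySem.List.sorted (PySem.Set.inter keys pvAlphabet) (fun k => pvAlphabet.idxOf k) false
  let result : PySem.Dict String Int :=
    letters.foldl (fun r k =>
      let s := (PySem.Dict.mk monom_a).getD k 0 + (PySem.Dict.mk monom_b).getD k 0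
      if s ≠ 0 then r.insert k s else r) (PySem.Dict.mk [])
  (result.insert " " c).items

-- ===== PRECONDITION & SPEC =====
def Spec_monom_multiply (monom_a : List (String × Int)) (monom_b : List (String × Int)) (out : List (String × Int)) : Prop := out = monom_multiply_alt monom_a monom_b
instance (monom_a : List (String × Int)) (monom_b : List (String × Int)) (out : List (String × Int)) : Decidable (Spec_monom_multiply monom_a monom_b out) := by unfold Spec_monom_multiply; infer_instance

-- ===== CLAIM (what is proved, stated in full; the proofs are below) =====
def Claim_equal_monom_multiply : Prop := ∀ (monom_a : List (String × Int)) (monom_b : List (String × Int)), Dom_monom_multiply monom_a monom_b → Spec_monom_multiply monom_a monom_b (monom_multiply monom_a monom_b)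

-- ===== LEMMAS AND PROOFS =====

-- the exponent sum both loops compute for a letter v
def pvSum (a b : List (String × Int)) (v : String) : Int :=
  (PySem.Dict.mk a).getD v 0 + (PySem.Dict.mk b).getD v 0

theorem pvSum_def (a b : List (String × Int)) (v : String) :
    (PySem.Dict.mk a).getD v 0 + (PySem.Dict.mk b).getD v 0 = pvSum a b v := rfl

theorem pvContains_mk_false (m : List (String × Int)) (v : String)
    (h : v ∉ m.map Prod.fst) : (PySem.Dict.mk m).contains v = false := by
  rw [PySem.Dict.contains_eq_decide_mem_keys]
  have hk : (PySem.Dict.mk m).keys = m.map Prod.fst := rfl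
  rw [hk]
  simpa using h

theorem pvOrderOf_eq_getD (m : List (String × Int)) (v : String) :
    pvOrderOf m v = (PySem.Dict.mk m).getD v 0 := by
  unfold pvOrderOf
  by_cases h : (PySem.Dict.mk m).contains v = true
  · simp [h]
  · have hf : (PySem.Dict.mk m).contains v = false := by
      cases hc : (PySem.Dict.mk m).contains v
      · rfl
      · exact absurd hc h
    simp [hf, PySem.Dict.getD_of_not_contains _ _ hf]

theorem pvConstant_eq (m : List (String × Int)) :
    pvConstant m = (if m = [] then 0 else (PySem.Dict.mk m).getD " " 1) := by
  unfold pvConstant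
  by_cases hm : m = []
  · simp [hm]
  · simp only [hm, if_false]
    by_cases h : (PySem.Dict.mk m).contains " " = true
    · simp only [h, if_true]
      rcases hg : (PySem.Dict.mk m).get? " " with _ | w
      · rw [PySem.Dict.contains_eq_isSome_get?, hg] at h
        simp at h
      · rw [PySem.Dict.getD_of_get?_eq_some _ _ hg, PySem.Dict.getD_of_get?_eq_some _ _ hg]
    · have hf : (PySem.Dict.mk m).contains " " = false := by
        cases hc : (PySem.Dict.mk m).contains " "
        · rfl
        · exact absurd hc h
      simp only [hf, Bool.false_eq_true, if_false]
      rw [PySem.Dict.getD_of_not_contains _ _ hf]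

theorem pvSum_eq_zero_of_not_mem (a b : List (String × Int)) (v : String)
    (ha : v ∉ a.map Prod.fst) (hb : v ∉ b.map Prod.fst) : pvSum a b v = 0 := by
  unfold pvSum
  rw [PySem.Dict.getD_of_not_contains _ _ (pvContains_mk_false a v ha),
      PySem.Dict.getD_of_not_contains _ _ (pvContains_mk_false b v hb)]
  simp

theorem pvAlphabet_nodup : pvAlphabet.Nodup := by decide

theorem pvAlphabet_pairwise_idxOf :
    pvAlphabet.Pairwise (fun x y => pvAlphabet.idxOf x < pvAlphabet.idxOf y) := by decide

theorem pvSpaceNotInAlphabet : (" " : String) ∉ pvAlphabet := by decide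

-- A loop over distinct fresh keys, inserting only where the sum is nonzero, then the ' ' slot:
-- the items list is the filtered map followed by the constant pair.
theorem pv_loop_items (a b : List (String × Int)) (L : List String) (hnd : L.Nodup)
    (hsub : ∀ v ∈ L, v ∈ pvAlphabet) (cst : Int) :
    ((L.foldl (fun (r : PySem.Dict String Int) v =>
        if pvSum a b v = 0 then r else r.insert v (pvSum a b v)) (PySem.Dict.mk [])).insert " " cst).items
      = (L.filter (fun v => decide (¬ pvSum a b v = 0))).map (fun v => (v, pvSum a b v)) ++ [(" ", cst)] := by
  have hfun : (fun (r : PySem.Dict String Int) v =>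
        if pvSum a b v = 0 then r else r.insert v (pvSum a b v))
      = (fun (r : PySem.Dict String Int) v =>
        if ¬ pvSum a b v = 0 then r.insert v (pvSum a b v) else r) := by
    funext r v
    rw [ite_not]
  have hitems : (L.foldl (fun (r : PySem.Dict String Int) v =>
        if pvSum a b v = 0 then r else r.insert v (pvSum a b v)) (PySem.Dict.mk [])).items
      = (L.filter (fun v => decide (¬ pvSum a b v = 0))).map (fun v => (v, pvSum a b v)) := by
    rw [hfun, PySem.List.foldl_ite_eq_foldl_filter]
    rw [PySem.Dict.items_foldl_insert_fresh _ (fun v => v) (fun v => pvSum a b v) _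
          (fun x _ => rfl) (by simpa using List.Nodup.filter _ hnd)]
    simp
  rw [PySem.Dict.items_insert_of_not_contains _ _ ?_, hitems]
  rw [PySem.Dict.contains_eq_decide_mem_keys]
  have hk : ∀ (d : PySem.Dict String Int), d.keys = d.items.map Prod.fst := fun _ => rfl
  rw [hk, hitems]
  simp only [List.map_map, decide_eq_false_iff_not, List.mem_map, Function.comp]
  rintro ⟨v, hv, hveq⟩
  exact pvSpaceNotInAlphabet (hveq ▸ hsub v (List.mem_of_mem_filter hv))

theorem pv_sorted_letters (a b : List (String × Int)) :
    PySem.List.sorted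
        (PySem.Set.inter (PySem.Set.union (PySem.Set.ofList (a.map Prod.fst)) (PySem.Set.ofList (b.map Prod.fst))) pvAlphabet)
        (fun k => pvAlphabet.idxOf k) false
      = pvAlphabet.filter (fun v => decide (v ∈ a.map Prod.fst ∨ v ∈ b.map Prod.fst)) := by
  have h1 : (pvAlphabet.filter (fun v => decide (v ∈ a.map Prod.fst ∨ v ∈ b.map Prod.fst))).Nodup :=
    List.Nodup.filter _ pvAlphabet_nodup
  have h2 : (PySem.Set.inter (PySem.Set.union (PySem.Set.ofList (a.map Prod.fst)) (PySem.Set.ofList (b.map Prod.fst))) pvAlphabet).Nodup :=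
    PySem.Set.nodup_inter _ _ (PySem.Set.nodup_union _ _ (PySem.Set.nodup_ofList _))
  refine PySem.List.sorted_eq_of_perm_of_pairwise_lt _ _ _ ?_ ?_
  · refine (List.perm_ext_iff_of_nodup h1 h2).mpr (fun v => ?_)
    simp only [List.mem_filter, PySem.Set.mem_inter, PySem.Set.mem_union, PySem.Set.mem_ofList,
      decide_eq_true_eq]
    tauto
  · exact List.Pairwise.filter _ pvAlphabet_pairwise_idxOf

theorem monom_multiply_eq_alt (a b : List (String × Int)) :
    monom_multiply a b = monom_multiply_alt a b := by
  unfold monom_multiply monom_multiply_alt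
  simp only [pvOrderOf_eq_getD, pvConstant_eq, pvSum_def, ne_eq, ite_not]
  rw [pv_sorted_letters]
  rw [pv_loop_items a b pvAlphabet pvAlphabet_nodup (fun v hv => hv) _,
      pv_loop_items a b _ (List.Nodup.filter _ pvAlphabet_nodup)
        (fun v hv => List.mem_of_mem_filter hv) _]
  have hfilter : (pvAlphabet.filter (fun v => decide (v ∈ a.map Prod.fst ∨ v ∈ b.map Prod.fst))).filter
        (fun v => decide (¬ pvSum a b v = 0))
      = pvAlphabet.filter (fun v => decide (¬ pvSum a b v = 0)) := by
    rw [List.filter_filter]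
    refine List.filter_congr fun v _ => ?_
    by_cases h : pvSum a b v = 0
    · simp [h]
    · have hmem : v ∈ a.map Prod.fst ∨ v ∈ b.map Prod.fst := by
        by_contra hc
        simp only [not_or] at hc
        exact h (pvSum_eq_zero_of_not_mem a b v hc.1 hc.2)
      simp [h]
      simpa using hmem
  rw [hfilter]

-- ===== VERDICT (by name: the statement is the Claim_ definition above) =====
theorem monom_multiply_spec : Claim_equal_monom_multiply := by
  intro a b _
  unfold Spec_monom_multiply
  exact monom_multiply_eq_alt a b
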